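-- pv_equiv track=rewrite | github.com/Alvaropz/Python_problems_BinarySearch | 1. Easy/vertical_cipher/vertical_cipher.py | vertical_cipher
-- ===== SOURCE A (Python) =====
-- def vertical_cipher(s, n):
--     cipher_list = []
--     for index, char in enumerate(s):
--         if index < n:
--             string_ref = char
--             index_ref = index + n
--             while index_ref < len(s):
--                 string_ref += s[index_ref]
--                 index_ref += n
--             cipher_list.append(string_ref)
--         else:
--             break
--     return cipher_list
-- ===== SOURCE B (Python) =====
-- def vertical_cipher(s, n):
--     if n <= 0:
--         return []
--     cipher_list = []
--     for index, char in enumerate(s):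
--         col = index % n
--         if col == len(cipher_list):
--             cipher_list.append(char)
--         else:
--             cipher_list[col] += char
--     return cipher_list
-- ===== Notes on version B (the rewrite author's own statement) =====
-- stated objective: simpler
-- what changed: Replaces A's per-column gather (outer loop over the first n indices, each with an inner strided while-loop re-scanning s) by a single forward pass that distributes each character into bucket index % n, with an explicit n <= 0 guard.
import Mathlib
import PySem

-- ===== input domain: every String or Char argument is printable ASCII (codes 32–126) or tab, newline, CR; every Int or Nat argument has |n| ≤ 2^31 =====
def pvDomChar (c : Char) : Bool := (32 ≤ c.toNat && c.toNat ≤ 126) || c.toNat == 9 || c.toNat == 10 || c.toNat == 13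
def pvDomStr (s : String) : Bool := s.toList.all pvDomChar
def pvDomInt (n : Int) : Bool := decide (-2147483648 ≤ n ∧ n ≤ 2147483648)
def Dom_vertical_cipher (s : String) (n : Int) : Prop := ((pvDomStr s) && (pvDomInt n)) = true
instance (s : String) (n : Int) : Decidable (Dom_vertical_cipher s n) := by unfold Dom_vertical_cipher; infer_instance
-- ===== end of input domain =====

-- B replaces A's per-column strided inner while-loop by a single forward pass that
-- distributes each character into bucket index % n (objective: simpler one-pass decomposition).

-- ===== PORT A =====
-- inner while-loop: string_ref += s[index_ref]; index_ref += n  (fuel = s.length bounds the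
-- iteration count, since the loop is only reached with n ≥ 1 and index_ref grows by n each step)
def pvInnerA (s : List Char) (n : Int) : Nat → Int → String → String
  | 0, _, acc => acc
  | fuel + 1, idx, acc =>
    if idx < (s.length : Int) then
      pvInnerA s n fuel (idx + n) (acc.push ((PySem.List.pyGet? s idx).getD ' '))
    else acc

-- the for-loop over enumerate(s) with the break
def pvOuterA (s : List Char) (n : Int) : List (Int × Char) → List String
  | [] => []
  | (i, c) :: rest =>
    if i < n then
      pvInnerA s n s.length (i + n) (String.ofList [c]) :: pvOuterA s n rest
    else []

def vertical_cipher (s : String) (n : Int) : List String :=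
  pvOuterA s.toList n (PySem.List.enumerate s.toList)

-- ===== PORT B =====
def pvStepB (n : Int) (buckets : List String) (p : Int × Char) : List String :=
  let col := PySem.Int.mod p.1 n
  if col = (buckets.length : Int) then buckets ++ [String.ofList [p.2]]
  else buckets.modify col.toNat (fun t => t.push p.2)

def vertical_cipher_alt (s : String) (n : Int) : List String :=
  if n ≤ 0 then [] else (PySem.List.enumerate s.toList).foldl (pvStepB n) []

-- ===== PRECONDITION & SPEC =====
def Spec_vertical_cipher (s : String) (n : Int) (out : List String) : Prop := out = vertical_cipher_alt s n
instance (s : String) (n : Int) (out : List String) : Decidable (Spec_vertical_cipher s n out) := by unfold Spec_vertical_cipher; infer_instance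

-- ===== CLAIM (what is proved, stated in full; the proofs are below) =====
def Claim_equal_vertical_cipher : Prop := ∀ (s : String) (n : Int), Dom_vertical_cipher s n → Spec_vertical_cipher s n (vertical_cipher s n)

-- ===== LEMMAS AND PROOFS =====

-- the characters of column i: s[i], s[i+n], s[i+2n], …  (n = np+1)
def colChars (s : List Char) (np : Nat) (i : Nat) : List Char :=
  if h : i < s.length then s[i] :: colChars s np (i + np + 1) else []
termination_by s.length - i
decreasing_by omega

theorem colChars_of_le {s : List Char} {np i : Nat} (h : s.length ≤ i) :
    colChars s np i = [] := by
  rw [colChars]; simp [Nat.not_lt.mpr h]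

theorem push_eq (s : String) (c : Char) : s.push c = s ++ String.ofList [c] :=
  (String.append_left_inj s).mp rfl

theorem pvInnerA_eq (s : List Char) (np : Nat) :
    ∀ (fuel i : Nat) (acc : String), s.length ≤ i + fuel →
      pvInnerA s ((np + 1 : Nat) : Int) fuel (i : Int) acc
        = acc ++ String.ofList (colChars s np i) := by
  intro fuel
  induction fuel with
  | zero =>
    intro i acc h
    rw [colChars_of_le (by omega)]
    simp [pvInnerA]
  | succ fuel ih =>
    intro i acc h
    by_cases hi : i < s.length
    · rw [colChars]
      simp only [hi, dif_pos]
      rw [pvInnerA, if_pos (by exact_mod_cast hi)]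
      have hc : (PySem.List.pyGet? s (i : Int)).getD ' ' = s[i] := by
        simp [PySem.List.pyGet?_natCast, List.getElem?_eq_getElem hi]
      have hcast : (i : Int) + ((np + 1 : Nat) : Int) = ((i + np + 1 : Nat) : Int) := by
        push_cast; ring
      rw [hc, hcast, ih (i + np + 1) _ (by omega), push_eq, String.append_assoc,
        ← String.ofList_append]
      rfl
    · rw [colChars_of_le (by omega), pvInnerA, if_neg (by exact_mod_cast hi)]
      simp
  
theorem pvOuterA_eq (s : List Char) (np : Nat) :
    ∀ (t : List Char) (k : Nat), t = s.drop k →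
      pvOuterA s ((np + 1 : Nat) : Int) (PySem.List.enumerate t (k : Int))
        = (List.range' k (min s.length (np + 1) - k)).map
            (fun i => String.ofList (colChars s np i)) := by
  intro t
  induction t with
  | nil =>
    intro k hk
    have hlen : s.length ≤ k := by
      by_contra h
      have := List.drop_eq_nil_iff.mp hk.symm
      omega
    have : min s.length (np + 1) - k = 0 := by omega
    simp [this, PySem.List.enumerate_nil, pvOuterA]
  | cons c rest ih =>
    intro k hk
    have hklt : k < s.length := by
      by_contra h
      rw [List.drop_eq_nil_iff.mpr (by omega)] at hk
      simp at hk
    have hck : s[k] = c := by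
      have := congrArg (fun l => l.head?) hk
      simpa [List.head?_drop, List.getElem?_eq_getElem hklt] using this.symm
    rw [PySem.List.enumerate_cons, pvOuterA]
    by_cases hkn : k < np + 1
    · rw [if_pos (by exact_mod_cast hkn)]
      have hcast : (k : Int) + ((np + 1 : Nat) : Int) = ((k + np + 1 : Nat) : Int) := by
        push_cast; ring
      rw [hcast, pvInnerA_eq s np s.length (k + np + 1) _ (by omega)]
      have hrest : rest = s.drop (k + 1) := by
        have := congrArg (fun l => l.tail) hk
        simpa [List.tail_drop] using this
      have hcast2 : (k : Int) + 1 = ((k + 1 : Nat) : Int) := by push_cast; ring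
      rw [hcast2, ih (k + 1) hrest]
      have hm : min s.length (np + 1) - k = (min s.length (np + 1) - (k + 1)) + 1 := by
        omega
      rw [hm, List.range'_succ, List.map_cons]
      congr 1
      conv_rhs => rw [colChars]
      rw [dif_pos hklt, hck, ← String.ofList_append]
      rfl
    · rw [if_neg (by exact_mod_cast hkn)]
      have h0 : min s.length (np + 1) - k = 0 := by omega
      rw [h0]
      rfl

theorem vertical_cipher_pos (s : String) (np : Nat) :
    vertical_cipher s ((np + 1 : Nat) : Int)
      = (List.range (min s.toList.length (np + 1))).map
          (fun i => String.ofList (colChars s.toList np i)) := by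
  unfold vertical_cipher
  have h0 : (PySem.List.enumerate s.toList (0 : Int))
      = PySem.List.enumerate s.toList ((0 : Nat) : Int) := by norm_num
  rw [h0, pvOuterA_eq s.toList np s.toList 0 rfl]
  rw [List.range_eq_range']
  simp

theorem vertical_cipher_nonpos (s : String) (n : Int) (hn : n ≤ 0) :
    vertical_cipher s n = [] := by
  unfold vertical_cipher
  cases h : s.toList with
  | nil => simp [PySem.List.enumerate_nil, pvOuterA]
  | cons c rest =>
    rw [PySem.List.enumerate_cons, pvOuterA, if_neg (by omega)]

theorem colChars_append_len (l : List Char) (np : Nat) (c : Char) :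
    colChars (l ++ [c]) np l.length = [c] := by
  rw [colChars, dif_pos (by simp), colChars_of_le (by simp)]
  simp

theorem colChars_append (l : List Char) (np : Nat) (c : Char) :
    ∀ (d i : Nat), i ≤ l.length → l.length - i ≤ d →
      colChars (l ++ [c]) np i
        = colChars l np i ++ (if (l.length - i) % (np + 1) = 0 then [c] else []) := by
  intro d
  induction d with
  | zero =>
    intro i hi hd
    have he : i = l.length := by omega
    subst he
    rw [colChars_append_len, colChars_of_le le_rfl]
    simp
  | succ d ihd =>
    intro i hi hd
    by_cases he : i = l.length
    · subst he
      rw [colChars_append_len, colChars_of_le le_rfl]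
      simp
    · have hilt : i < l.length := by omega
      have hlen : i < (l ++ [c]).length := by simp; omega
      have hL : colChars (l ++ [c]) np i
          = l[i] :: colChars (l ++ [c]) np (i + np + 1) := by
        rw [colChars, dif_pos hlen]
        congr 1
        exact List.getElem_append_left hilt
      have hR : colChars l np i = l[i] :: colChars l np (i + np + 1) := by
        rw [colChars, dif_pos hilt]
      rw [hL, hR]
      by_cases h2 : i + np + 1 ≤ l.length
      · rw [ihd (i + np + 1) h2 (by omega)]
        have hc : l.length - i = (l.length - (i + np + 1)) + (np + 1) := by omega
        rw [List.cons_append, hc, Nat.add_mod_right]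
      · have hne : (l.length - i) % (np + 1) ≠ 0 := by
          rw [Nat.mod_eq_of_lt (by omega)]; omega
        rw [colChars_of_le (s := l ++ [c]) (np := np) (i := i + np + 1) (by simp; omega),
          colChars_of_le (s := l) (np := np) (i := i + np + 1) (by omega), if_neg hne]
        simp

theorem mod_sub_helper (n k j : Nat) (hj : j < n) (hjk : j ≤ k) :
    (k - j) % n = 0 ↔ k % n = j := by
  have h := Nat.modEq_iff_dvd' (n := n) hjk
  unfold Nat.ModEq at h
  rw [Nat.mod_eq_of_lt hj] at h
  constructor
  · intro h0
    exact (h.mpr (Nat.dvd_of_mod_eq_zero h0)).symm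
  · intro hkj
    exact Nat.dvd_iff_mod_eq_zero.mp (h.mp hkj.symm)

theorem B_invariant (l : List Char) (np : Nat) :
    (PySem.List.enumerate l (0 : Int)).foldl (pvStepB ((np + 1 : Nat) : Int)) []
      = (List.range (min l.length (np + 1))).map
          (fun i => String.ofList (colChars l np i)) := by
  induction l using List.reverseRecOn with
  | nil => simp [PySem.List.enumerate_nil]
  | append_singleton l c ih =>
    rw [PySem.List.enumerate_append, List.foldl_append, ih,
      PySem.List.enumerate_cons, PySem.List.enumerate_nil]
    simp only [List.foldl_cons, List.foldl_nil, List.length_append, List.length_cons,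
      List.length_nil, zero_add]
    unfold pvStepB
    rw [PySem.Int.mod_natCast]
    simp only [List.length_map, List.length_range]
    by_cases hk : l.length < np + 1
    · have hmodk : l.length % (np + 1) = l.length := Nat.mod_eq_of_lt hk
      have hmin : min l.length (np + 1) = l.length := by omega
      rw [if_pos (by rw [hmodk, hmin])]
      have hmin' : min (l.length + 1) (np + 1) = l.length + 1 := by omega
      rw [hmin', List.range_succ, List.map_append, hmin]
      congr 1
      · apply List.map_congr_left
        intro i hi
        have hilt : i < l.length := by simpa using hi
        rw [colChars_append l np c (l.length - i) i (by omega) le_rfl,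
          if_neg (by rw [Nat.mod_eq_of_lt (by omega)]; omega)]
        simp
      · simp [colChars_append_len]
    · have hmin : min l.length (np + 1) = np + 1 := by omega
      have hmlt : l.length % (np + 1) < np + 1 := Nat.mod_lt _ (by omega)
      rw [if_neg (by rw [hmin]; exact_mod_cast (by omega : l.length % (np+1) ≠ np + 1))]
      have hmin' : min (l.length + 1) (np + 1) = np + 1 := by omega
      rw [hmin', hmin]
      apply List.ext_getElem
      · simp
      · intro j hj1 hj2
        have hjlt : j < np + 1 := by simpa using hj2
        rw [List.getElem_modify]
        simp only [Int.toNat_natCast, List.getElem_map, List.getElem_range]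
        rw [colChars_append l np c l.length j (by omega) (by omega)]
        by_cases hje : l.length % (np + 1) = j
        · rw [if_pos hje,
            if_pos ((mod_sub_helper (np + 1) l.length j hjlt (by omega)).mpr hje),
            push_eq, String.ofList_append]
        · rw [if_neg hje,
            if_neg (fun h0 => hje ((mod_sub_helper (np + 1) l.length j hjlt (by omega)).mp h0))]
          simp

theorem vertical_cipher_alt_pos (s : String) (np : Nat) :
    vertical_cipher_alt s ((np + 1 : Nat) : Int)
      = (List.range (min s.toList.length (np + 1))).map
          (fun i => String.ofList (colChars s.toList np i)) := by
  unfold vertical_cipher_alt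
  rw [if_neg (by push_cast; omega)]
  exact B_invariant s.toList np

-- ===== VERDICT (by name: the statement is the Claim_ definition above) =====
theorem vertical_cipher_spec : Claim_equal_vertical_cipher := by
  intro s n _
  unfold Spec_vertical_cipher
  by_cases hn : n ≤ 0
  · rw [vertical_cipher_nonpos s n hn]
    unfold vertical_cipher_alt
    rw [if_pos hn]
  · obtain ⟨np, hnp⟩ : ∃ np : Nat, n = ((np + 1 : Nat) : Int) :=
      ⟨n.toNat - 1, by omega⟩
    rw [hnp, vertical_cipher_pos, vertical_cipher_alt_pos]
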